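-- pv_equiv track=rewrite | github.com/fritzgrobbelaar/puzzles | aoc2023/12_2_binary_counter.py | doesIdsMatch
-- ===== SOURCE A (Python) =====
-- def doesIdsMatch(binaryString, ids):
--     binaryString = binaryString.replace('?','.')
--     listBinary = binaryString.split('.')
--     lengths = [str(len(x)) for x in listBinary if len(x) != 0]
--     if lengths == ids:
--         a = ('Full match found:', lengths, ids, 'True')
--         return True
--     a = ('returning false from doesIdsMatch', binaryString, ids)
--     return False
-- ===== SOURCE B (Python) =====
-- def doesIdsMatch(binaryString, ids):
--     result = []
--     run = 0
--     for c in binaryString: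
--         if c in '.?':
--             if run:
--                 result.append(str(run))
--                 run = 0
--         else:
--             run += 1
--     if run:
--         result.append(str(run))
--     return result == ids
-- ===== Notes on version B (the rewrite author's own statement) =====
-- stated objective: alternative
-- what changed: Replaces the replace/split/list-comprehension pipeline with a single streaming character scan keeping an integer run counter, appending str(run) at each separator boundary and at end of string.
import Mathlib
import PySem

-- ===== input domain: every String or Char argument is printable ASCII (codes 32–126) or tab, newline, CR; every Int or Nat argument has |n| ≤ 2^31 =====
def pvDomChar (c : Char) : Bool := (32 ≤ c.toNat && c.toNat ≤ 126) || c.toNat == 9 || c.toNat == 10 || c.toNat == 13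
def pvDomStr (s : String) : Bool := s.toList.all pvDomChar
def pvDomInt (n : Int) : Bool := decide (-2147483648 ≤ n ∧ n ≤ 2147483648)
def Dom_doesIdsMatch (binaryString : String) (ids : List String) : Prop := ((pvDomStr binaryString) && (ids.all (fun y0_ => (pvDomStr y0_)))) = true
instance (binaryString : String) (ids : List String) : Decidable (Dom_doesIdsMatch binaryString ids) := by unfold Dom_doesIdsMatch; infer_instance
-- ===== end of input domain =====

-- B replaces A's replace/split/comprehension pipeline by a single streaming run-length scan (objective: alternative single-pass algorithm).

-- ===== PORT A =====
-- literal port of A: replace '?' by '.', split on '.', keep str(len(x)) of the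
-- non-empty pieces, compare with ids (the dead tuple assignments 'a = …' have no effect)
def doesIdsMatch (binaryString : String) (ids : List String) : Bool :=
  let binaryString' := PySem.Str.replace binaryString "?" "."
  let listBinary := (PySem.Chars.splitOn binaryString'.toList ['.']).map String.ofList
  let lengths := (listBinary.filter (fun x => PySem.Str.len x != 0)).map
      (fun x => PySem.Int.toStr (PySem.Str.len x))
  decide (lengths = ids)

-- ===== PORT B =====
-- literal port of Source B: one pass, integer run counter, flush str(run) at each '.'/'?' and at the end
/-- B-side helper: the loop body of Source B (one character step of the scan) -/
def pvStep (st : List String × Nat) (c : Char) : List String × Nat :=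
  if c = '.' ∨ c = '?' then
    (if st.2 ≠ 0 then (st.1 ++ [PySem.Int.toStr (st.2 : Int)], 0) else st)
  else (st.1, st.2 + 1)

def doesIdsMatch_alt (binaryString : String) (ids : List String) : Bool :=
  let st := binaryString.toList.foldl pvStep ([], 0)
  let result := if st.2 ≠ 0 then st.1 ++ [PySem.Int.toStr (st.2 : Int)] else st.1
  decide (result = ids)

-- ===== PRECONDITION & SPEC =====
def Spec_doesIdsMatch (binaryString : String) (ids : List String) (out : Bool) : Prop := out = doesIdsMatch_alt binaryString ids
instance (binaryString : String) (ids : List String) (out : Bool) : Decidable (Spec_doesIdsMatch binaryString ids out) := by unfold Spec_doesIdsMatch; infer_instance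

-- ===== CLAIM (what is proved, stated in full; the proofs are below) =====
def Claim_equal_doesIdsMatch : Prop := ∀ (binaryString : String) (ids : List String), Dom_doesIdsMatch binaryString ids → Spec_doesIdsMatch binaryString ids (doesIdsMatch binaryString ids)

-- ===== LEMMAS AND PROOFS =====

/-- '?' ↦ '.', other characters unchanged -/
def pvRepl (c : Char) : Char := if c = '?' then '.' else c

/-- is the character a separator ('.' or '?') -/
def pvIsSep (c : Char) : Bool := c == '.' || c == '?'

/-- split on the characters satisfying p; always non-empty -/
def pvSplitP (p : Char → Bool) : List Char → List (List Char)
  | [] => [[]]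
  | c :: t =>
    if p c then [] :: pvSplitP p t
    else
      match pvSplitP p t with
      | [] => [[c]]
      | g :: gs => (c :: g) :: gs

/-- run lengths of the maximal non-separator runs, with `run` pending characters already seen -/
def pvRuns : List Char → Nat → List Nat
  | [], run => if run ≠ 0 then [run] else []
  | c :: t, run =>
    if pvIsSep c then (if run ≠ 0 then run :: pvRuns t 0 else pvRuns t 0)
    else pvRuns t (run + 1)

lemma pvSplitP_ne_nil (p : Char → Bool) (cs : List Char) : pvSplitP p cs ≠ [] := by
  cases cs with
  | nil => simp [pvSplitP]
  | cons c t =>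
    simp only [pvSplitP]
    split
    · simp
    · cases h : pvSplitP p t <;> simp

lemma pvReplace_go (cs acc : List Char) (fuel : Nat) (h : cs.length ≤ fuel) :
    PySem.Chars.replace.go ['?'] ['.'] fuel cs acc = acc.reverse ++ cs.map pvRepl := by
  induction cs generalizing acc fuel with
  | nil => cases fuel <;> simp [PySem.Chars.replace.go]
  | cons c t ih =>
    cases fuel with
    | zero => simp at h
    | succ f =>
      simp only [PySem.Chars.replace.go]
      by_cases hc : c = '?'
      · have : List.isPrefixOf ['?'] (c :: t) = true := by
          simp [List.isPrefixOf, hc]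
        rw [if_pos this]
        have hdrop : List.drop (List.length ['?']) (c :: t) = t := by simp
        simp only [List.length_cons] at h
        rw [hdrop, ih _ _ (by omega)]
        simp [pvRepl, hc]
      · have : List.isPrefixOf ['?'] (c :: t) = false := by
          simp only [List.isPrefixOf, Bool.and_eq_false_iff, beq_eq_false_iff_ne, ne_eq]
          exact Or.inl fun h => hc h.symm
        rw [if_neg (by simp [this])]
        simp only [List.length_cons] at h
        rw [ih _ _ (by omega)]
        simp [pvRepl, hc]

lemma pvReplace_eq (cs : List Char) :
    PySem.Chars.replace cs ['?'] ['.'] = cs.map pvRepl := by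
  simp only [PySem.Chars.replace, List.isEmpty_cons, if_neg]
  simpa using pvReplace_go cs [] cs.length le_rfl

lemma pvSplitOn_go (cs cur : List Char) (acc : List (List Char)) (fuel : Nat) (h : cs.length ≤ fuel) :
    PySem.Chars.splitOn.go ['.'] fuel cs cur acc
      = acc.reverse ++ ((cur.reverse ++ (pvSplitP (· == '.') cs).headI)
          :: (pvSplitP (· == '.') cs).tail) := by
  induction cs generalizing cur acc fuel with
  | nil => cases fuel <;> simp [PySem.Chars.splitOn.go, pvSplitP]
  | cons c t ih =>
    cases fuel with
    | zero => simp at h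
    | succ f =>
      simp only [PySem.Chars.splitOn.go]
      simp only [List.length_cons] at h
      by_cases hc : c = '.'
      · have hp : List.isPrefixOf ['.'] (c :: t) = true := by
          simp [List.isPrefixOf, hc]
        rw [if_pos hp]
        have hdrop : List.drop (List.length ['.']) (c :: t) = t := by simp
        rw [hdrop, ih _ _ _ (by omega)]
        have hs2 : pvSplitP (· == '.') (c :: t) = [] :: pvSplitP (· == '.') t := by
          simp [pvSplitP, hc]
        rw [hs2]
        cases h2 : pvSplitP (· == '.') t with
        | nil => exact absurd h2 (pvSplitP_ne_nil _ t)
        | cons g gs => simp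
      · have hp : List.isPrefixOf ['.'] (c :: t) = false := by
          simp only [List.isPrefixOf, Bool.and_eq_false_iff, beq_eq_false_iff_ne, ne_eq]
          exact Or.inl fun h => hc h.symm
        rw [if_neg (by simp [hp])]
        rw [ih _ _ _ (by omega)]
        have hne := pvSplitP_ne_nil (· == '.') t
        simp only [pvSplitP, beq_iff_eq, if_neg hc]
        cases hs : pvSplitP (· == '.') t with
        | nil => exact absurd hs hne
        | cons g gs => simp

lemma pvSplitOn_eq (cs : List Char) :
    PySem.Chars.splitOn cs ['.'] = pvSplitP (· == '.') cs := by
  simp only [PySem.Chars.splitOn]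
  rw [pvSplitOn_go cs [] [] (cs.length + 1) (by omega)]
  cases hs : pvSplitP (· == '.') cs with
  | nil => exact absurd hs (pvSplitP_ne_nil _ cs)
  | cons g gs => simp

lemma pvSplitP_map_repl (cs : List Char) :
    pvSplitP (· == '.') (cs.map pvRepl) = (pvSplitP pvIsSep cs).map (List.map pvRepl) := by
  induction cs with
  | nil => simp [pvSplitP]
  | cons c t ih =>
    have hsep : (pvRepl c == '.') = pvIsSep c := by
      by_cases h1 : c = '?' <;> by_cases h2 : c = '.' <;> simp [pvRepl, pvIsSep, h1, h2]
    simp only [List.map_cons, pvSplitP, hsep, ih]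
    by_cases hp : pvIsSep c = true
    · simp [hp]
    · simp only [hp, if_neg, Bool.false_eq_true, not_false_iff]
      cases hs : pvSplitP pvIsSep t with
      | nil => exact absurd hs (pvSplitP_ne_nil _ t)
      | cons g gs => simp

/-- A's "lengths of non-empty pieces" equals the run-length scan, generalized over the pending run -/
lemma pvRuns_eq_splitP (cs : List Char) (run : Nat) :
    pvRuns cs run
      = (if run + (pvSplitP pvIsSep cs).headI.length ≠ 0
           then [run + (pvSplitP pvIsSep cs).headI.length] else [])
        ++ (((pvSplitP pvIsSep cs).tail.filter (fun x => x.length != 0)).map List.length) := by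
  induction cs generalizing run with
  | nil => simp [pvRuns, pvSplitP]
  | cons c t ih =>
    by_cases hp : pvIsSep c = true
    · have hne := pvSplitP_ne_nil pvIsSep t
      have hexp : ((pvSplitP pvIsSep t).filter (fun x => x.length != 0)).map List.length
          = (if (pvSplitP pvIsSep t).headI.length ≠ 0
               then [(pvSplitP pvIsSep t).headI.length] else [])
            ++ (((pvSplitP pvIsSep t).tail.filter (fun x => x.length != 0)).map List.length) := by
        cases hs : pvSplitP pvIsSep t with
        | nil => exact absurd hs hne
        | cons g gs =>
          by_cases hg : g.length = 0 <;> simp [List.filter_cons, hg]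
      simp only [pvRuns, pvSplitP, hp, if_pos, List.headI_cons, List.tail_cons, List.length_nil]
      rw [ih 0]
      simp only [Nat.zero_add]
      rw [← hexp]
      by_cases hr : run = 0 <;> simp [hr]
    · have hne := pvSplitP_ne_nil pvIsSep t
      simp only [pvRuns, pvSplitP, hp, if_neg, Bool.false_eq_true, not_false_iff]
      rw [ih (run + 1)]
      cases hs : pvSplitP pvIsSep t with
      | nil => exact absurd hs hne
      | cons g gs =>
        simp only [List.headI_cons, List.tail_cons, List.length_cons]
        have : run + 1 + g.length = run + (g.length + 1) := by omega
        rw [this]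

lemma pvFoldFlush_eq_runs (cs : List Char) (res : List String) (run : Nat) :
    (if (cs.foldl pvStep (res, run)).2 ≠ 0 then
        (cs.foldl pvStep (res, run)).1 ++ [PySem.Int.toStr (((cs.foldl pvStep (res, run)).2 : Nat) : Int)]
      else (cs.foldl pvStep (res, run)).1)
    = res ++ (pvRuns cs run).map (fun n => PySem.Int.toStr (n : Int)) := by
  induction cs generalizing res run with
  | nil =>
    by_cases hr : run = 0 <;> simp [pvRuns, hr]
  | cons c t ih =>
    by_cases hc : c = '.' ∨ c = '?'
    · have hsep : pvIsSep c = true := by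
        rcases hc with h | h <;> simp [pvIsSep, h]
      by_cases hr : run = 0
      · simp only [List.foldl_cons, pvStep, if_pos hc, hr, ne_eq, not_true_eq_false, if_neg,
          not_false_iff, pvRuns, hsep, if_pos]
        simpa [hr] using ih res 0
      · simp only [List.foldl_cons, pvStep, if_pos hc, if_pos hr, pvRuns, hsep, if_pos, ne_eq, hr,
          not_false_iff]
        rw [ih (res ++ [PySem.Int.toStr (run : Int)]) 0]
        simp [hr]
    · have hsep : pvIsSep c = false := by
        simp only [not_or] at hc
        simp [pvIsSep, hc.1, hc.2]
      simp only [List.foldl_cons, pvStep, if_neg hc, pvRuns, hsep, Bool.false_eq_true, if_neg,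
        not_false_iff]
      exact ih res (run + 1)

/-- cast bookkeeping: rendering the kept lengths directly equals rendering after mapping to Int -/
lemma pvGs (gs : List (List Char)) :
    List.map (fun x : List Char => PySem.Int.toStr (x.length : Int))
        (List.filter (fun x : List Char => ((x.length : Int) != 0)) gs)
      = List.map (fun n : Int => PySem.Int.toStr n)
          (List.flatMap (fun a : Nat => [(a : Int)])
            (List.map List.length (List.filter (fun x : List Char => x.length != 0) gs))) := by
  induction gs with
  | nil => simp
  | cons g t ih =>
    by_cases h : g.length = 0
    · simpa [List.filter_cons, h] using ih
    · simp only [List.filter_cons]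
      simp [h, ih]

-- ===== VERDICT (by name: the statement is the Claim_ definition above) =====
theorem doesIdsMatch_spec : Claim_equal_doesIdsMatch := by
  intro binaryString ids _
  simp only [Spec_doesIdsMatch, doesIdsMatch, doesIdsMatch_alt]
  rw [pvFoldFlush_eq_runs binaryString.toList [] 0]
  rw [decide_eq_decide]
  -- both sides reduce to the run lengths of the maximal non-separator runs
  rw [PySem.Str.toList_replace]
  have h1 : ("?" : String).toList = ['?'] := by decide
  have h2 : ("." : String).toList = ['.'] := by decide
  rw [h1, h2, pvReplace_eq, pvSplitOn_eq, pvSplitP_map_repl]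
  rw [pvRuns_eq_splitP binaryString.toList 0]
  have hne := pvSplitP_ne_nil pvIsSep binaryString.toList
  cases hs : pvSplitP pvIsSep binaryString.toList with
  | nil => exact absurd hs hne
  | cons g gs =>
    simp only [List.map_cons, List.headI_cons, List.tail_cons, Nat.zero_add, List.nil_append]
    by_cases hg : g.length = 0
    · simp only [List.filter_cons, hg, PySem.Str.len, List.filter_map, List.map_map,
        Function.comp_def]
      simp [hg, Function.comp_def, String.toList_ofList, List.length_map, pvGs gs]
    · simp only [List.filter_cons, hg, PySem.Str.len, List.filter_map, List.map_map,
        Function.comp_def]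
      simp [hg, Function.comp_def, String.toList_ofList, List.length_map, pvGs gs]
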